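-- pv_equiv track=rewrite | github.com/nikunjpanchal22/code_clone_classification | python_t1_t2_full/Gpt_false_pair_2686.py | get_longest_three_letter_word
-- ===== SOURCE A (Python) =====
-- def get_longest_three_letter_word(lines):
-- 	k = -1
-- 	long_three_letter = []
-- 	for line in lines:
-- 		phrase_words = line.split()
-- 		for word in phrase_words:
-- 			length = len(word)
-- 			if length > k:
-- 				k = length
-- 				long_three_letter = [word]
-- 			elif length == k:
-- 				long_three_letter.append(word)
-- 	return long_three_letter
-- ===== SOURCE B (Python) =====
-- def get_longest_three_letter_word(lines):
-- 	words = [w for line in lines for w in line.split()]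
-- 	maxlen = max(map(len, words), default=-1)
-- 	return [w for w in words if len(w) == maxlen]
-- ===== Notes on version B (the rewrite author's own statement) =====
-- stated objective: simpler
-- what changed: Replaces A's one-pass incremental max-tracking with list rebuilding/appending by a flatten-then-max-then-filter pipeline: flatten all words, take max(map(len, ...), default=-1), filter words of that length.
import Mathlib
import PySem

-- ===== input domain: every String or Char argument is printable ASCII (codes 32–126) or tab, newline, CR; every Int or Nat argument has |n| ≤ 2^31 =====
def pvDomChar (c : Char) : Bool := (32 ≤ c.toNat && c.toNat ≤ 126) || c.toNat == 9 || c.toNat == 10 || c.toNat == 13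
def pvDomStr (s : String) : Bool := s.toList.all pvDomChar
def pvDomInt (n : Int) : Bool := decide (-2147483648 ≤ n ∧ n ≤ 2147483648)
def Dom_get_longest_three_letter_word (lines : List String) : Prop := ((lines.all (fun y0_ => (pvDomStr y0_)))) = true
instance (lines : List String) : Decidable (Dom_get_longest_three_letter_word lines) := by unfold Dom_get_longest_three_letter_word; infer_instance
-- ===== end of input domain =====

-- B replaces A's incremental max-tracking loop by a flatten / max / filter pipeline (simpler decomposition, same cost).


-- ===== PORT A =====
-- body of A's inner 'for word in phrase_words' loop, on state (k, long_three_letter)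
def pvAstep (st : Int × List String) (word : String) : Int × List String :=
  let length := PySem.Str.len word
  if length > st.1 then (length, [word])
  else if length = st.1 then (st.1, st.2 ++ [word])
  else st

def get_longest_three_letter_word (lines : List String) : List String :=
  (lines.foldl (fun st line => (PySem.Str.split₀ line).foldl pvAstep st)
    ((-1 : Int), ([] : List String))).2

-- ===== PORT B =====
def get_longest_three_letter_word_alt (lines : List String) : List String :=
  let words := lines.flatMap PySem.Str.split₀
  let maxlen := PySem.List.maxD (words.map PySem.Str.len) (fun x => x) (-1)
  words.filter (fun w => PySem.Str.len w == maxlen)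

-- ===== PRECONDITION & SPEC =====
def Spec_get_longest_three_letter_word (lines : List String) (out : List String) : Prop := out = get_longest_three_letter_word_alt lines
instance (lines : List String) (out : List String) : Decidable (Spec_get_longest_three_letter_word lines out) := by unfold Spec_get_longest_three_letter_word; infer_instance

-- ===== CLAIM (what is proved, stated in full; the proofs are below) =====
def Claim_equal_get_longest_three_letter_word : Prop := ∀ (lines : List String), Dom_get_longest_three_letter_word lines → Spec_get_longest_three_letter_word lines (get_longest_three_letter_word lines)

-- ===== LEMMAS AND PROOFS =====

-- running max of word lengths, as maintained in A's state's first component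
def pvK (words : List String) (k : Int) : Int :=
  words.foldl (fun m w => max m (PySem.Str.len w)) k

lemma pvK_cons (w : String) (rest : List String) (k : Int) :
    pvK (w :: rest) k = pvK rest (max k (PySem.Str.len w)) := rfl

lemma le_pvK (words : List String) (k : Int) : k ≤ pvK words k := by
  induction words generalizing k with
  | nil => simp [pvK]
  | cons w rest ih =>
      exact le_trans (le_max_left _ _) (ih (max k (PySem.Str.len w)))

lemma foldl_flat (lines : List String) (st : Int × List String) :
    lines.foldl (fun st line => (PySem.Str.split₀ line).foldl pvAstep st) st
      = (lines.flatMap PySem.Str.split₀).foldl pvAstep st := by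
  induction lines generalizing st with
  | nil => simp
  | cons l rest ih => simp [List.foldl_append, ih]

lemma loop_char (words : List String) (k : Int) (acc : List String) :
    words.foldl pvAstep (k, acc) =
      (pvK words k,
        (if pvK words k = k then acc else []) ++
          words.filter (fun w => PySem.Str.len w == pvK words k)) := by
  induction words generalizing k acc with
  | nil => simp [pvK]
  | cons w rest ih =>
      rw [List.foldl_cons, pvK_cons]
      rcases lt_trichotomy (PySem.Str.len w) k with hlt | heq | hgt
      · -- length < k : state unchanged, w never has maximal length
        have hmax : max k (PySem.Str.len w) = k := max_eq_left hlt.le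
        have hstep : pvAstep (k, acc) w = (k, acc) := by
          simp only [pvAstep]
          rw [if_neg (by omega), if_neg (by omega)]
        have hwf : (PySem.Str.len w == pvK rest k) = false := by
          have := le_pvK rest k
          rw [beq_eq_false_iff_ne]; omega
        rw [hstep, ih, hmax, List.filter_cons, hwf]
        simp
      · -- length = k : append w
        have hmax : max k (PySem.Str.len w) = k := max_eq_left (le_of_eq heq)
        have hstep : pvAstep (k, acc) w = (k, acc ++ [w]) := by
          simp only [pvAstep]
          rw [if_neg (by omega), if_pos heq]
        rw [hstep, ih, hmax, List.filter_cons]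
        by_cases hk : pvK rest k = k
        · have hwt : (PySem.Str.len w == pvK rest k) = true := by
            rw [beq_iff_eq]; omega
          rw [hwt, if_pos hk, if_pos hk]
          simp
        · have hwf : (PySem.Str.len w == pvK rest k) = false := by
            rw [beq_eq_false_iff_ne]; omega
          rw [hwf, if_neg hk, if_neg hk]
          simp
      · -- length > k : reset
        have hmax : max k (PySem.Str.len w) = PySem.Str.len w := max_eq_right hgt.le
        have hstep : pvAstep (k, acc) w = (PySem.Str.len w, [w]) := by
          simp only [pvAstep]
          rw [if_pos hgt]
        have hne : pvK rest (PySem.Str.len w) ≠ k := by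
          have := le_pvK rest (PySem.Str.len w); omega
        rw [hstep, ih, hmax, List.filter_cons, if_neg hne]
        by_cases hw : pvK rest (PySem.Str.len w) = PySem.Str.len w
        · have hwt : (PySem.Str.len w == pvK rest (PySem.Str.len w)) = true := by
            rw [beq_iff_eq]; omega
          rw [hwt, if_pos hw]
          simp
        · have hwf : (PySem.Str.len w == pvK rest (PySem.Str.len w)) = false := by
            rw [beq_eq_false_iff_ne]; omega
          rw [hwf, if_neg hw]
          simp

lemma pvK_eq_maxD (words : List String) :
    pvK words (-1) = PySem.List.maxD (words.map PySem.Str.len) (fun x => x) (-1) := by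
  cases words with
  | nil => decide
  | cons w rest =>
      have h0 : (0:Int) ≤ PySem.Str.len w := by
        rw [PySem.Str.len_eq]; positivity
      have hmax : max (-1 : Int) (PySem.Str.len w) = PySem.Str.len w :=
        max_eq_right (by omega)
      rw [PySem.List.maxD]
      simp only [List.map_cons, PySem.List.max?_id_cons, Option.getD_some]
      rw [pvK_cons, hmax, pvK, List.foldl_map]

-- ===== VERDICT (by name: the statement is the Claim_ definition above) =====
theorem get_longest_three_letter_word_spec : Claim_equal_get_longest_three_letter_word := by
  intro lines _
  unfold Spec_get_longest_three_letter_word get_longest_three_letter_word get_longest_three_letter_word_alt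
  rw [foldl_flat, loop_char, pvK_eq_maxD]
  simp
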